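-- pv_equiv track=rewrite | github.com/SamuelManaay/projectTrackerApp | API/microservice.py | thingy
-- ===== SOURCE A (Python) =====
-- def thingy(aDictionaryArray):
--   alreadyFound = []
--   result = []
--   for item in aDictionaryArray:
--     if item in alreadyFound:
--       if item not in result:
--         result += [item]
--     alreadyFound += [item]
--   return result
-- ===== SOURCE B (Python) =====
-- def thingy(aDictionaryArray):
--   # duplicates, ordered by second occurrence: keep x exactly at the index
--   # where the prefix before it contains x exactly once
--   return [x for i, x in enumerate(aDictionaryArray)
--           if aDictionaryArray[:i].count(x) == 1]
-- ===== Notes on version B (the rewrite author's own statement) =====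
-- stated objective: simpler
-- what changed: Replaces A's two growing accumulator lists (seen-list membership scan plus dedup on the result) with a stateless comprehension that keeps an element exactly when the prefix before it contains it exactly once (its second occurrence).
import Mathlib
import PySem

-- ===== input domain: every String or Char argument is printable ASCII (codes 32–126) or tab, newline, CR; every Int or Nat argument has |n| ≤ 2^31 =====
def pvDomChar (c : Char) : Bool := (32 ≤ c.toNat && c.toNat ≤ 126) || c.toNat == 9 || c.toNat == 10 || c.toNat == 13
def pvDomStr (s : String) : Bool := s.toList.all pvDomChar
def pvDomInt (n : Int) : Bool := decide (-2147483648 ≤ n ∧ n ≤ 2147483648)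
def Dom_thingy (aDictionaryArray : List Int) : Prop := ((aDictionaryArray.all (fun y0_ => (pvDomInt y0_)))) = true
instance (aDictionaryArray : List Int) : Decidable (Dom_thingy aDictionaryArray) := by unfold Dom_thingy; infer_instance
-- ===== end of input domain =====

-- B replaces A's two accumulator lists by a stateless comprehension keeping each
-- element exactly when the prefix before it contains it exactly once (simpler).


-- ===== PORT A =====
-- loop over items keeping state (alreadyFound, result), exactly as the Python
def thingy (aDictionaryArray : List Int) : List Int :=
  (aDictionaryArray.foldl
    (fun (st : List Int × List Int) item =>
      (st.1 ++ [item],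
       if st.1.contains item then
         (if st.2.contains item then st.2 else st.2 ++ [item])
       else st.2))
    ([], [])).2

-- ===== PORT B =====
-- [x for i, x in enumerate(xs) if xs[:i].count(x) == 1]
def thingy_alt (aDictionaryArray : List Int) : List Int :=
  ((PySem.List.enumerate aDictionaryArray).filter
    (fun p => (PySem.List.slice aDictionaryArray none (some p.1)).count p.2 == 1)).map (·.2)

-- ===== PRECONDITION & SPEC =====
def Spec_thingy (aDictionaryArray : List Int) (out : List Int) : Prop := out = thingy_alt aDictionaryArray
instance (aDictionaryArray : List Int) (out : List Int) : Decidable (Spec_thingy aDictionaryArray out) := by unfold Spec_thingy; infer_instance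

-- ===== CLAIM (what is proved, stated in full; the proofs are below) =====
def Claim_equal_thingy : Prop := ∀ (aDictionaryArray : List Int), Dom_thingy aDictionaryArray → Spec_thingy aDictionaryArray (thingy aDictionaryArray)

-- ===== LEMMAS AND PROOFS =====

-- common reference: emit x when the prefix seen so far contains it exactly once
def dupRef : List Int → List Int → List Int
  | _, [] => []
  | pre, x :: rest =>
      (if pre.count x = 1 then [x] else []) ++ dupRef (pre ++ [x]) rest

lemma foldA_eq_dupRef (rest : List Int) : ∀ (pre res : List Int),
    (∀ x, x ∈ res ↔ 2 ≤ pre.count x) →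
    (rest.foldl
      (fun (st : List Int × List Int) item =>
        (st.1 ++ [item],
         if st.1.contains item then
           (if st.2.contains item then st.2 else st.2 ++ [item])
         else st.2))
      (pre, res)).2 = res ++ dupRef pre rest := by
  induction rest with
  | nil => intro pre res _; simp [dupRef]
  | cons x rest ih =>
    intro pre res hinv
    have hpre : x ∈ pre ↔ 0 < pre.count x := List.count_pos_iff.symm
    have hres' :
        (if pre.contains x then
           (if res.contains x then res else res ++ [x])
         else res) = res ++ (if pre.count x = 1 then [x] else []) := by
      by_cases hp : x ∈ pre
      · by_cases hr : x ∈ res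
        · have h2 : pre.count x ≠ 1 := by have := (hinv x).mp hr; omega
          simp [hp, hr, h2]
        · have h1 : pre.count x = 1 := by
            have := hpre.mp hp
            have : ¬ 2 ≤ pre.count x := fun h => hr ((hinv x).mpr h)
            omega
          simp [hp, hr, h1]
      · have h2 : pre.count x ≠ 1 := fun h => hp (hpre.mpr (by omega))
        simp [hp, h2]
    have hinv' : ∀ y, y ∈ res ++ (if pre.count x = 1 then [x] else []) ↔
        2 ≤ (pre ++ [x]).count y := by
      intro y
      rw [List.mem_append, hinv y, List.count_append]
      have hc1 : List.count y [x] = (if x = y then 1 else 0) := by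
        simp [List.count_cons]
      rw [hc1]
      rcases eq_or_ne y x with rfl | hne
      · rw [if_pos rfl]
        by_cases h1 : pre.count y = 1
        · simp [h1]
        · rw [if_neg h1]
          simp only [List.not_mem_nil, or_false]
          omega
      · simp only [if_neg (fun h : x = y => hne h.symm), add_zero]
        simp [hne]
    simp only [List.foldl_cons, hres']
    rw [ih (pre ++ [x]) _ hinv', dupRef]
    simp

lemma foldB_eq_dupRef (rest : List Int) : ∀ (pre xs : List Int), xs = pre ++ rest →
    ((PySem.List.enumerate rest (pre.length : Int)).filter
      (fun p => (PySem.List.slice xs none (some p.1)).count p.2 == 1)).map (·.2)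
      = dupRef pre rest := by
  induction rest with
  | nil => intro pre xs _; simp [PySem.List.enumerate_nil, dupRef]
  | cons x rest ih =>
    intro pre xs hxs
    rw [PySem.List.enumerate_cons]
    have htake : PySem.List.slice xs none (some (pre.length : Int)) = pre := by
      rw [PySem.List.slice_to_natCast, hxs]
      simp
    have hrec := ih (pre ++ [x]) xs (by simp [hxs])
    simp only [List.length_append, List.length_cons, List.length_nil,
      Nat.cast_add, Nat.cast_one, zero_add] at hrec
    rw [List.filter_cons]
    by_cases h1 : pre.count x = 1
    · simp [htake, h1, hrec, dupRef]
    · simp [htake, h1, hrec, dupRef]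

-- ===== VERDICT (by name: the statement is the Claim_ definition above) =====
theorem thingy_spec : Claim_equal_thingy := by
  intro xs _
  show thingy xs = thingy_alt xs
  have hA := foldA_eq_dupRef xs [] [] (by simp)
  have hB := foldB_eq_dupRef xs [] xs (by simp)
  simp only [List.length_nil, Nat.cast_zero] at hB
  simp only [thingy, thingy_alt, hB]
  simpa using hA
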